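/-
  INTERFACE CHECK for segment C7 of `start_decoder` (the worker of `start_decoder.C7` found it missing in Vorbis/Spec/StartDecoderATest.lean):
  the cut-point assertion `AtC7` / `AtC7F` gives the preconditions of the two callees whose contracts are not the ordinary ones.

      compute_codewords        `CodewordsPre A.2 g.frames' (C7.blkT A) s` at the callee's entry, from `Built` there   (`C7.codewordsPre_of_built`)
      setup_temp_free          the MACHINE-LEVEL contract `setup_temp_free.weakSpec` (the call `setup_temp_free(f, values, 0)` after a failed
                               compute_codewords violates the LIFO contract: S4), from `Built` at the segment's entry state and the facts
                               the walker has at the callee's entry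
  and the carrier over compute_codewords' footprint fits the exit: `InC8` from `Built` + VAL (the shape of the exit of C7a).
-/
import Vorbis.Spec.StartDecoderC7
import Vorbis.Spec.Alloc
namespace Vorbis.Spec.StartDecoder.C7Test
open X86 X86.User Asan

variable {u₀ : State} {g : Ghost} {i : Nat} {A2 A3 Ai Aw : Arena} {A : Arena × List Obj} {lengths values : Nat} {v s : State}

/-- compute_codewords' precondition at `AtC7`: the state `s` at the callee's entry (return address pushed: `rsp + 8 = R`), no shadow
byte written since `v`, `Built` carried to `s` (`C7.built_through` over the push), the four argument registers. -/
example (h : InC7 u₀ g i A2 A3 Ai Aw A lengths values v) (hb : Built g i A2 A3 Ai Aw A lengths values s)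
    (hun : ShadowUntouched v.mem s.mem) (hrsp : (s.reg .rsp).toNat + 8 = g.R)
    (hrdi : (s.reg .rdi).toNat = g.cb s.mem i) (hrsi : (s.reg .rsi).toNat = lengths) (hrcx : (s.reg .rcx).toNat = values)
    (hrdx : (argU32 (s.reg .rdx) : Int) = Codebook.entries s.mem (g.cb s.mem i)) :
    (compute_codewords.spec A.2 g.frames' (C7.blkT A)).pre s := by
  show CodewordsPre A.2 g.frames' (C7.blkT A) s
  apply C7.codewordsPre_of_built hb ?_ hrdi hrsi hrcx hrdx
  refine ⟨?_, h.frame.offText⟩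
  rw [hrsp]
  exact h.frame.shadow.untouched hun

/-- `Built` goes through the push of the return address (the one window `[R − 8, R)`): what `hb` above is made from. -/
example (h : InC7 u₀ g i A2 A3 Ai Aw A lengths values v) (hRlo : 0x700000 + 408 ≤ g.R) (hRhi : g.R + 0x38 ≤ 0x800000)
    (hs : Mem.SameExcept [⟨g.R - 8, g.R⟩] v.mem s.mem) (hun : ShadowUntouched v.mem s.mem)
    (r14 : s.reg .r14 = v.reg .r14) (rbx : s.reg .rbx = v.reg .rbx) (r12 : s.reg .r12 = v.reg .r12) :
    Built g i A2 A3 Ai Aw A lengths values s := by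
  refine (C7.built_through h.built h.frame.shadow h.frame.offText hRlo hRhi hs hun ?_ r14 rbx r12).1
  intro w hw
  rw [List.mem_singleton.mp hw]
  left
  show g.R - 408 ≤ g.R - 8 ∧ g.R ≤ g.R
  omega

/-- The machine-level precondition of `setup_temp_free(f, values, 0)` at `AtC7F`, a sparse book: `s` = the state at the callee's
entry; `*f` reads the same as at the segment's entry `v` (only return addresses were pushed). `sz = 0`: nothing is poisoned, so the
last clause (freeze-6) holds whatever `values` is (Vorbis/Spec/ReleaseTest.lean). -/
example (h : InC7F u₀ g i A2 A3 Ai Aw A lengths values v) (hsp : Codebook.sparse v.mem (g.cb v.mem i) = 1)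
    (hun : ShadowUntouched v.mem s.mem) (hrsp : (s.reg .rsp).toNat + 8 = g.R)
    (hfeq : Mem.EqOn g.f (g.f + 1808) v.mem s.mem)
    (hrdi : (s.reg .rdi).toNat = g.f) (hrsi : (s.reg .rsi).toNat = values) (hrdx : (s.reg .rdx).toNat % 2 ^ 32 = 0) :
    (setup_temp_free.weakSpec A.2 g.frames').pre s := by
  obtain ⟨_, _, hvalsp⟩ := C7.built_bounds h.built
  obtain ⟨hv8, hvlo, hvhi⟩ := hvalsp hsp
  have hobr := h.built.cur.sd.bits.OBR
  simp only [voff] at hobr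
  have er : r8 0 = 0 := by decide
  refine ⟨⟨?_, h.frame.offText⟩, ?_, ?_, Or.inr ⟨?_, ?_, ?_⟩, Or.inr (Or.inl ?_)⟩
  · rw [hrsp]
    exact h.frame.shadow.untouched hun
  · rw [hrdi]
    exact ObjLive.of_liveIn (h.built.cur.hand.obj.mono (C4.sub_frames g A))
  · rw [hrdi]
    have h0 := ArenaOK.alloc_buffer_ne_zero h.built.cur.sd.arena
    simp only [vacc, voff] at h0 ⊢
    rw [hfeq.u64 (g.f + 112) (by omega) (by omega) (by omega)]
    exact h0
  · rw [hrsi]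
    exact hv8
  · rw [hrsi]
    exact hvlo
  · rw [hrsi, hrdx, er]
    exact hvhi
  · rw [hrdx]
    exact er

/-- The exit of C7a fits the entry of C8: `Frame` at `pc_C8`, `Built` and VAL for the memory after the call give `AtC8`. -/
example (hfr : Frame u₀ g pc_C8 A s) (hb : Built g i A2 A3 Ai Aw A lengths values s)
    (hval : Codebook.sparse s.mem (g.cb s.mem i) = 1 →
      VAL s.mem values (Codebook.sorted_entries s.mem (g.cb s.mem i)).toNat (Codebook.entries s.mem (g.cb s.mem i)).toNat) :
    AtC8 u₀ g i s :=
  ⟨A, lengths, values, A2, A3, Ai, Aw, hfr, hb, hval⟩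

/-- The exit of C7b: `AtERR` from `Frame` + CUR(i) at `AtC7F` over a footprint of `C7.FailWin` windows (`C7.fail_exit`). -/
example (h : InC7F u₀ g i A2 A3 Ai Aw A lengths values v) {ws : List Span} (hs : Mem.SameExcept ws v.mem s.mem)
    (hsh : ShadowUntouched v.mem s.mem) (hw : ∀ x, x ∈ ws → C7.FailWin g x) (hrip : s.rip = pc_ERR)
    (hrsp : s.reg .rsp = v.reg .rsp) (hcode : CodeOK u₀ s.mem) (hinv : abiInv s) (hrax : s.reg .rax = 0) : AtERR u₀ g s :=
  C7.fail_exit h.frame h.built.cur hs hsh hw hrip hrsp hcode hinv hrax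

end Vorbis.Spec.StartDecoder.C7Test
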